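-- pv_equiv track=rewrite | github.com/Hae8/HAE1 | 04_algorithm/240312/01_2869.py | snail_slow_up
-- ===== SOURCE A (Python) =====
-- def snail_slow_up(A, B, V):
--     snail = 0
--     day = 0
--     while True:
--         snail += A
--         day += 1
--         if snail >= V:
--             return day
--         else: snail -= B
-- ===== SOURCE B (Python) =====
-- def snail_slow_up(A, B, V):
--     if V <= A:
--         return 1
--     return -(-(V - B) // (A - B))
-- ===== Notes on version B (the rewrite author's own statement) =====
-- stated objective: simpler
-- what changed: Replaces the day-by-day simulation loop with the closed-form ceiling division ceil((V-B)/(A-B)) (1 if V<=A).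
import Mathlib
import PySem

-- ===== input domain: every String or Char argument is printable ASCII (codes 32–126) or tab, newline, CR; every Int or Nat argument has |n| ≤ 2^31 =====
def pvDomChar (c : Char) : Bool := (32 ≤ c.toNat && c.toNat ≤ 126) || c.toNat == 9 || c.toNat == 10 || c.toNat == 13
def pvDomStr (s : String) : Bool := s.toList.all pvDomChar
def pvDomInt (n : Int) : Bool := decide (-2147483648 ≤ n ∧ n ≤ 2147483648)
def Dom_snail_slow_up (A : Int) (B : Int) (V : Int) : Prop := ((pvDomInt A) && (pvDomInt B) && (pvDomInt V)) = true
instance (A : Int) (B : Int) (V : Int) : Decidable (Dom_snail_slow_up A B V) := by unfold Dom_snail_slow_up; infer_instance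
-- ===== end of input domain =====

-- B replaces A's day-by-day simulation loop with a closed-form ceiling division (objective: simpler).

-- ===== PORT A =====
-- A's 'while True' loop, transliterated; the Nat argument is a termination bound only —
-- under Pre_ the loop returns before it is exhausted (proved below), so the 0 default is never the result.
def snailLoop (A : Int) (B : Int) (V : Int) (snail : Int) (day : Int) : Nat → Int
  | 0 => 0
  | fuel + 1 =>
    let snail' := snail + A
    let day' := day + 1
    if snail' ≥ V then day' else snailLoop A B V (snail' - B) day' fuel

def snail_slow_up (A : Int) (B : Int) (V : Int) : Int :=
  snailLoop A B V 0 0 (V.natAbs + B.natAbs + 1)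

-- ===== PORT B =====
def snail_slow_up_alt (A : Int) (B : Int) (V : Int) : Int :=
  if V ≤ A then 1 else -(PySem.Int.floordiv (-(V - B)) (A - B))

-- ===== PRECONDITION & SPEC =====
-- A's loop terminates exactly when the first day already suffices (V ≤ A) or the snail makes
-- net progress (B < A); on all other inputs A loops forever, so they are excluded.
def Pre_snail_slow_up (A : Int) (B : Int) (V : Int) : Prop := V ≤ A ∨ B < A
instance (A : Int) (B : Int) (V : Int) : Decidable (Pre_snail_slow_up A B V) := by
  unfold Pre_snail_slow_up; infer_instance

def pvWitness_snail_slow_up : Int × Int × Int := (2, 1, 10)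

def Spec_snail_slow_up (A : Int) (B : Int) (V : Int) (out : Int) : Prop := out = snail_slow_up_alt A B V
instance (A : Int) (B : Int) (V : Int) (out : Int) : Decidable (Spec_snail_slow_up A B V out) := by
  unfold Spec_snail_slow_up; infer_instance

-- ===== CLAIM (what is proved, stated in full; the proofs are below) =====
def Claim_equal_snail_slow_up : Prop := ∀ (A : Int) (B : Int) (V : Int), Dom_snail_slow_up A B V → Pre_snail_slow_up A B V → Spec_snail_slow_up A B V (snail_slow_up A B V)

-- ===== LEMMAS AND PROOFS =====

-- Under net progress (B < A) and a still-unreached wall (0 < V - snail - B), with enough fuel,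
-- A's loop computes day + ceil((V - snail - B)/(A - B)).
theorem snailLoop_eq (A B V : Int) (hk : B < A) :
    ∀ (fuel : Nat) (snail day : Int), 0 < V - snail - B → (V - snail - B).toNat ≤ fuel →
      snailLoop A B V snail day fuel = day + (-(PySem.Int.floordiv (-(V - snail - B)) (A - B))) := by
  intro fuel
  induction fuel with
  | zero => intro snail day hx hf; omega
  | succ n ih =>
    intro snail day hx hf
    by_cases h : snail + A ≥ V
    · have hc : -(PySem.Int.floordiv (-(V - snail - B)) (A - B)) = 1 := by
        rw [PySem.Int.neg_floordiv_neg_eq_iff_of_pos (by omega)]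
        constructor <;> [omega; nlinarith]
      simp only [snailLoop, ge_iff_le]
      rw [if_pos h, hc]
    · have hx' : 0 < V - (snail + A - B) - B := by omega
      have hf' : (V - (snail + A - B) - B).toNat ≤ n := by omega
      have hrec := ih (snail + A - B) (day + 1) hx' hf'
      simp only [snailLoop]
      rw [if_neg h]
      rw [hrec]
      -- show (day + 1) + c' = day + c  where c = c' + 1
      set c' : Int := -(PySem.Int.floordiv (-(V - (snail + A - B) - B)) (A - B)) with hc'
      have hb := (PySem.Int.neg_floordiv_neg_eq_iff_of_pos (a := V - (snail + A - B) - B)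
        (b := A - B) (q := c') (by omega)).mp hc'.symm
      have hc : -(PySem.Int.floordiv (-(V - snail - B)) (A - B)) = c' + 1 := by
        rw [PySem.Int.neg_floordiv_neg_eq_iff_of_pos (by omega)]
        constructor <;> nlinarith [hb.1, hb.2]
      rw [hc]; ring

-- ===== VERDICT (by name: the statement is the Claim_ definition above) =====
theorem snail_slow_up_spec : Claim_equal_snail_slow_up := by
  intro A B V _ hPre
  unfold Spec_snail_slow_up snail_slow_up snail_slow_up_alt
  by_cases h1 : V ≤ A
  · have : snailLoop A B V 0 0 (V.natAbs + B.natAbs + 1) = 1 := by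
      simp only [snailLoop]
      rw [if_pos (by omega : (0:Int) + A ≥ V)]
      norm_num
    rw [this, if_pos h1]
  · have hk : B < A := by rcases hPre with h | h <;> omega
    have := snailLoop_eq A B V hk (V.natAbs + B.natAbs + 1) 0 0 (by omega) (by omega)
    rw [this, if_neg h1]
    simp
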